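-- pv_equiv track=rewrite | github.com/aniket-3001/Intro-to-Programming | IP Lab Monday/LAB-2/bonus-2.py | compute_series
-- ===== SOURCE A (Python) =====
-- def compute_series(a, b, N):
--     sum = 0
--     for i in range(1, N+1):
--         if i % 2 == 0:
--             sum += (i*b)
--         else:
--             sum += (i*a)
--     return (N*sum)
-- ===== SOURCE B (Python) =====
-- def compute_series(a, b, N):
--     k = N if N > 0 else 0
--     half = k // 2
--     odd_sum = ((k + 1) // 2) ** 2
--     even_sum = half * (half + 1)
--     return N * (a * odd_sum + b * even_sum)
-- ===== Notes on version B (the rewrite author's own statement) =====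
-- stated objective: faster
-- what changed: Replaced the O(N) parity loop with closed-form arithmetic-series formulas for the sums of odd and even indices up to N.
import Mathlib
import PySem

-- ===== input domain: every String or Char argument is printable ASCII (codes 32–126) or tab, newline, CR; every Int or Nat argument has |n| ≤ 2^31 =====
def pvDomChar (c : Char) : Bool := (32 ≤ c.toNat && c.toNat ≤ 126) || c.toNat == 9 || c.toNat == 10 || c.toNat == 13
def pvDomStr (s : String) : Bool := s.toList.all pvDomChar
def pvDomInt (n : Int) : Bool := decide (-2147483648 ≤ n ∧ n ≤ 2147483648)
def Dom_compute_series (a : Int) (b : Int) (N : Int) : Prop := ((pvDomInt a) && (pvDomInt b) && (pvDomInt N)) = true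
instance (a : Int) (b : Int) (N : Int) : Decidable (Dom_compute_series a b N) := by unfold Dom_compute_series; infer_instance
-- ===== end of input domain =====

-- B replaces A's O(N) parity loop by closed-form arithmetic-series sums (O(1)).

-- ===== PORT A =====
def compute_series (a : Int) (b : Int) (N : Int) : Int :=
  let sum := (PySem.List.pyRange 1 (N + 1) 1).foldl
    (fun sum i => if PySem.Int.mod i 2 = 0 then sum + i * b else sum + i * a) 0
  N * sum

-- ===== PORT B =====
def compute_series_alt (a : Int) (b : Int) (N : Int) : Int :=
  let k := if N > 0 then N else 0
  let half := PySem.Int.floordiv k 2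
  let odd_sum := (PySem.Int.floordiv (k + 1) 2) ^ 2
  let even_sum := half * (half + 1)
  N * (a * odd_sum + b * even_sum)

-- ===== PRECONDITION & SPEC =====
def Spec_compute_series (a : Int) (b : Int) (N : Int) (out : Int) : Prop := out = compute_series_alt a b N
instance (a : Int) (b : Int) (N : Int) (out : Int) : Decidable (Spec_compute_series a b N out) := by unfold Spec_compute_series; infer_instance

-- ===== CLAIM (what is proved, stated in full; the proofs are below) =====
def Claim_equal_compute_series : Prop := ∀ (a : Int) (b : Int) (N : Int), Dom_compute_series a b N → Spec_compute_series a b N (compute_series a b N)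

-- ===== LEMMAS AND PROOFS =====

-- The loop's sum over range(1, n+1) in closed form (n : Nat).
theorem pv_loop_closed (a b : Int) (n : Nat) :
    (PySem.List.pyRange 1 ((n : Int) + 1) 1).foldl
      (fun sum i => if PySem.Int.mod i 2 = 0 then sum + i * b else sum + i * a) 0
    = a * (((n + 1) / 2 : Nat) : Int) ^ 2 + b * ((n / 2 : Nat) : Int) * (((n / 2 : Nat) : Int) + 1) := by
  induction n with
  | zero =>
    simp
  | succ m ih =>
    rw [show ((m + 1 : Nat) : Int) + 1 = ((m : Int) + 1) + 1 by push_cast; ring,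
        PySem.List.pyRange_one_succ_right (by omega),
        List.foldl_append, ih]
    simp only [List.foldl]
    have hmod : PySem.Int.mod ((m : Int) + 1) 2 = (((m + 1) % 2 : Nat) : Int) := by
      exact_mod_cast PySem.Int.mod_natCast (m + 1) 2
    rw [hmod]
    rcases Nat.even_or_odd m with ⟨k, hk⟩ | ⟨k, hk⟩ <;> subst hk
    · -- m = k + k, i = m + 1 odd
      rw [show (k + k + 1) % 2 = 1 by omega]
      norm_num
      rw [show ((k:Int) + k + 1) / 2 = k by omega, show ((k:Int) + k) / 2 = k by omega,
          show ((k:Int) + k + 1 + 1) / 2 = k + 1 by omega]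
      ring
    · -- m = 2k + 1, i = m + 1 even
      rw [show (2 * k + 1 + 1) % 2 = 0 by omega]
      norm_num
      rw [show (2 * (k:Int) + 1 + 1) / 2 = k + 1 by omega, show (2 * (k:Int) + 1) / 2 = k by omega,
          show (2 * (k:Int) + 1 + 1 + 1) / 2 = k + 1 by omega]
      ring

-- ===== VERDICT (by name: the statement is the Claim_ definition above) =====
theorem compute_series_spec : Claim_equal_compute_series := by
  intro a b N _
  unfold Spec_compute_series compute_series compute_series_alt
  by_cases hN : N > 0
  · obtain ⟨n, rfl⟩ : ∃ n : Nat, N = (n : Int) := ⟨N.toNat, (Int.toNat_of_nonneg (le_of_lt hN)).symm⟩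
    simp only [hN, if_pos]
    rw [pv_loop_closed]
    have hhalf : PySem.Int.floordiv (n : Int) 2 = ((n / 2 : Nat) : Int) := by
      exact_mod_cast PySem.Int.floordiv_natCast n 2
    have hodd : PySem.Int.floordiv ((n : Int) + 1) 2 = (((n + 1) / 2 : Nat) : Int) := by
      exact_mod_cast PySem.Int.floordiv_natCast (n + 1) 2
    rw [hhalf, hodd]
    ring
  · have hnil : PySem.List.pyRange 1 (N + 1) 1 = [] :=
      PySem.List.pyRange_one_eq_nil (by omega)
    simp [hnil, hN]
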